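-- pv_equiv track=rewrite | github.com/yordan-marinov/fundamentals_python | text_processing/winning_ticket.py | side_checker
-- ===== SOURCE A (Python) =====
-- def side_checker(string):
--     result = []
--     winning_symbol = None
--     for element in string:
--         if element in WINNING_SYMBOLS:
--             if not result or element in result:
--                 result.append(element)
--                 winning_symbol = element
--             else:
--                 if len(result) >= WINNING_SYMBOLS[winning_symbol]:
--                     break
--                 else:
--                     result.clear()
--                     winning_symbol = None
--                     if element in WINNING_SYMBOLS:
--                         result.append(element)
--                         winning_symbol = element
--
--     return result, winning_symbol
--
-- WINNING_SYMBOLS = {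
--     "@": 6,
--     "#": 6,
--     "$": 6,
--     "^": 6,
-- }
-- ===== SOURCE B (Python) =====
-- WINNING_SYMBOLS = {
--     "@": 6,
--     "#": 6,
--     "$": 6,
--     "^": 6,
-- }
--
--
-- def side_checker(string):
--     # Two-phase: filter to winning symbols, then walk maximal runs,
--     # stopping when the previously adopted run already reached its threshold.
--     symbols = [c for c in string if c in WINNING_SYMBOLS]
--     result = []
--     winning_symbol = None
--     i = 0
--     while i < len(symbols):
--         if result and len(result) >= WINNING_SYMBOLS[winning_symbol]:
--             break
--         c = symbols[i]
--         j = i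
--         while j < len(symbols) and symbols[j] == c:
--             j += 1
--         result, winning_symbol = symbols[i:j], c
--         i = j
--     return result, winning_symbol
-- ===== Notes on version B (the rewrite author's own statement) =====
-- stated objective: alternative
-- what changed: B filters the string to its winning symbols first and then iterates over maximal runs (span/slice per run), replacing A's per-character state machine with append/clear/in-result bookkeeping.
import Mathlib
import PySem

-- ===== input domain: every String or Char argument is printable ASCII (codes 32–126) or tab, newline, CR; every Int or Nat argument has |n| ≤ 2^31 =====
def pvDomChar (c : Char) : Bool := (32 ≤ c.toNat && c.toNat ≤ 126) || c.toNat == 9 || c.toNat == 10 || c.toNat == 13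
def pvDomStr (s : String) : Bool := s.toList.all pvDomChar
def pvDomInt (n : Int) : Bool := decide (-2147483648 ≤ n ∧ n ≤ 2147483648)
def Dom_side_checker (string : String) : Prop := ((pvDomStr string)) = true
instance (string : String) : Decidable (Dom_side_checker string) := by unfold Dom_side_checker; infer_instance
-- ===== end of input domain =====

-- B replaces A's per-character state machine by filter-then-run-scan; objective: alternative (same cost).

-- ===== PORT A =====
def pvWS : PySem.Dict String Int :=
  PySem.Dict.ofList [("@", 6), ("#", 6), ("$", 6), ("^", 6)]

-- WINNING_SYMBOLS[winning_symbol]: the key is always present when this is consulted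
-- (result nonempty ⇒ winning_symbol was set to a winning symbol); 0 is a dead default.
def pvThresh (ws : Option String) : Int :=
  match ws with
  | some w => (pvWS.get? w).getD 0
  | none => 0

def pvLoopA : List Char → List String → Option String → List String × Option String
  | [], result, ws => (result, ws)
  | e :: rest, result, ws =>
    let el := String.mk [e]
    if (pvWS.get? el).isSome then
      if result = [] ∨ el ∈ result then
        pvLoopA rest (result ++ [el]) (some el)
      else
        if pvThresh ws ≤ (result.length : Int) then
          (result, ws)  -- break
        else
          -- result.clear(); winning_symbol = None; the re-check 'element in WINNING_SYMBOLS'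
          if (pvWS.get? el).isSome then
            pvLoopA rest ([] ++ [el]) (some el)
          else
            pvLoopA rest [] none
    else
      pvLoopA rest result ws

def side_checker (string : String) : List String × Option String :=
  pvLoopA string.toList [] none

-- ===== PORT B =====
def pvLoopB : List String → List String → Option String → List String × Option String
  | [], result, ws => (result, ws)
  | c :: rest, result, ws =>
    if result ≠ [] ∧ pvThresh ws ≤ (result.length : Int) then
      (result, ws)  -- break
    else
      -- inner while: j runs to the end of the maximal run of c; slice = the run
      pvLoopB (rest.dropWhile (· = c)) (c :: rest.takeWhile (· = c)) (some c)
termination_by l => l.length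
decreasing_by
  simpa using Nat.lt_succ_of_le (List.length_dropWhile_le (· = c) rest)

def side_checker_alt (string : String) : List String × Option String :=
  pvLoopB ((string.toList.filter (fun c => (pvWS.get? (String.mk [c])).isSome)).map
    (fun c => String.mk [c])) [] none

-- ===== PRECONDITION & SPEC =====
def Spec_side_checker (string : String) (out : List String × Option String) : Prop := out = side_checker_alt string
instance (string : String) (out : List String × Option String) : Decidable (Spec_side_checker string out) := by unfold Spec_side_checker; infer_instance

-- ===== CLAIM (what is proved, stated in full; the proofs are below) =====
def Claim_equal_side_checker : Prop := ∀ (string : String), Dom_side_checker string → Spec_side_checker string (side_checker string)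

-- ===== LEMMAS AND PROOFS =====

def pvSyms (l : List Char) : List String :=
  (l.filter (fun c => (pvWS.get? (String.mk [c])).isSome)).map (fun c => String.mk [c])

def pvWinning (s : String) : Prop := (pvWS.get? s).isSome

lemma pvWinning_thresh {w : String} (h : pvWinning w) : pvThresh (some w) = 6 := by
  unfold pvWinning at h
  unfold pvThresh
  by_cases h1 : w = "@"; · subst h1; decide
  by_cases h2 : w = "#"; · subst h2; decide
  by_cases h3 : w = "$"; · subst h3; decide
  by_cases h4 : w = "^"; · subst h4; decide
  exfalso
  simp [pvWS, PySem.Dict.ofList, PySem.Dict.update, List.foldl,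
    PySem.Dict.get?_insert, h1, h2, h3, h4, PySem.Dict.get?_empty] at h

lemma pvSyms_cons_win {c : Char} (l : List Char)
    (h : (pvWS.get? (String.mk [c])).isSome = true) :
    pvSyms (c :: l) = String.mk [c] :: pvSyms l := by
  simp [pvSyms, h]

lemma pvSyms_cons_skip {c : Char} (l : List Char)
    (h : ¬ (pvWS.get? (String.mk [c])).isSome = true) :
    pvSyms (c :: l) = pvSyms l := by
  simp [pvSyms, h]

lemma pvRep_shift (k : Nat) (w : String) (t : List String) :
    List.replicate k w ++ w :: t = List.replicate (k + 1) w ++ t := by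
  rw [List.replicate_succ']
  simp

-- main invariant: A's loop mid-run = B's loop continuing the same run
lemma pvMain (l : List Char) : ∀ (k : Nat) (w : String), 1 ≤ k → pvWinning w →
    pvLoopA l (List.replicate k w) (some w)
      = pvLoopB ((pvSyms l).dropWhile (· = w))
          (List.replicate k w ++ (pvSyms l).takeWhile (· = w)) (some w) := by
  induction l with
  | nil =>
    intro k w hk hw
    simp [pvSyms, pvLoopA, pvLoopB]
  | cons c rest ih =>
    intro k w hk hw
    by_cases hc : (pvWS.get? (String.mk [c])).isSome = true
    · rw [pvSyms_cons_win rest hc]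
      by_cases hew : String.mk [c] = w
      · subst hew
        rw [List.dropWhile_cons_of_pos (by simp), List.takeWhile_cons_of_pos (by simp)]
        rw [pvRep_shift]
        have hmem : String.mk [c] ∈ List.replicate k (String.mk [c]) := by
          simp [List.mem_replicate]; omega
        show pvLoopA (c :: rest) (List.replicate k (String.mk [c])) (some (String.mk [c])) = _
        rw [pvLoopA]
        simp only [hc, if_pos, hmem, or_true, if_true]
        have : List.replicate k (String.mk [c]) ++ [String.mk [c]]
            = List.replicate (k + 1) (String.mk [c]) := by
          rw [List.replicate_succ']
        rw [this]
        exact ih (k + 1) (String.mk [c]) (by omega) hw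
      · rw [List.dropWhile_cons_of_neg (by simpa using hew),
            List.takeWhile_cons_of_neg (by simpa using hew)]
        have hnm : String.mk [c] ∉ List.replicate k w := by
          simp [List.mem_replicate, hew]
        have hne : ¬ (List.replicate k w = [] ∨ String.mk [c] ∈ List.replicate k w) := by
          push_neg
          exact ⟨by simp [List.replicate_eq_nil_iff]; omega, hnm⟩
        rw [pvLoopA]
        simp only [hc, if_true, if_neg hne]
        rw [pvWinning_thresh hw]
        by_cases hbr : (6 : Int) ≤ ((List.replicate k w).length : Int)
        · rw [if_pos hbr, pvLoopB]
          rw [if_pos]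
          · simp
          · constructor
            · simp [List.replicate_eq_nil_iff]; omega
            · simp [pvWinning_thresh hw]
              simpa using hbr
        · rw [if_neg hbr, pvLoopB]
          rw [if_neg]
          · have := ih 1 (String.mk [c]) (by omega) (by simpa [pvWinning] using hc)
            simpa using this
          · push_neg
            intro _
            simp [pvWinning_thresh hw]
            simpa using hbr
    · rw [pvSyms_cons_skip rest hc, pvLoopA]
      simp only [hc, if_neg, Bool.false_eq_true, if_false]
      exact ih k w hk hw

lemma pvTop (l : List Char) : pvLoopA l [] none = pvLoopB (pvSyms l) [] none := by
  induction l with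
  | nil => simp [pvSyms, pvLoopA, pvLoopB]
  | cons c rest ih =>
    by_cases hc : (pvWS.get? (String.mk [c])).isSome = true
    · rw [pvSyms_cons_win rest hc, pvLoopA]
      simp only [hc, if_true]
      rw [if_pos (by simp)]
      rw [pvLoopB, if_neg (by simp)]
      have := pvMain rest 1 (String.mk [c]) (by omega) (by simpa [pvWinning] using hc)
      simpa using this
    · rw [pvSyms_cons_skip rest hc, pvLoopA]
      simp only [hc, Bool.false_eq_true, if_false]
      exact ih

-- ===== VERDICT (by name: the statement is the Claim_ definition above) =====
theorem side_checker_spec : Claim_equal_side_checker := by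
  intro s _
  unfold Spec_side_checker side_checker side_checker_alt
  exact pvTop s.toList
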